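-- pv_equiv track=rewrite | github.com/Myat-Phone-San/DocumentProcessing | app.py | calculate_mrz_checksum
-- ===== SOURCE A (Python) =====
-- MRZ_CHAR_VALUES = {
--     '0': 0, '1': 1, '2': 2, '3': 3, '4': 4, '5': 5, '6': 6, '7': 7, '8': 8, '9': 9,
--     '<': 0, 'A': 10, 'B': 11, 'C': 12, 'D': 13, 'E': 14, 'F': 15, 'G': 16, 'H': 17,
--     'I': 18, 'J': 19, 'K': 20, 'L': 21, 'M': 22, 'N': 23, 'O': 24, 'P': 25, 'Q': 26,
--     'R': 27, 'S': 28, 'T': 29, 'U': 30, 'V': 31, 'W': 32, 'X': 33, 'Y': 34, 'Z': 35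
-- }
--
-- WEIGHTS = [7, 3, 1]
--
-- def calculate_mrz_checksum(data_string: str) -> str:
--     """Calculates the checksum digit for a given MRZ data field using the Modulo 10 algorithm."""
--     total_sum = 0
--     for i, char in enumerate(data_string.upper()):
--         value = MRZ_CHAR_VALUES.get(char, 0)
--         weight = WEIGHTS[i % 3]
--         total_sum += value * weight
--     checksum = total_sum % 10
--     return str(checksum)
-- ===== SOURCE B (Python) =====
-- def _mrz_value(c):
--     o = ord(c)
--     if 48 <= o <= 57:
--         return o - 48
--     if 65 <= o <= 90:
--         return o - 55
--     return 0
--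
--
-- def calculate_mrz_checksum(data_string: str) -> str:
--     """Modulo-10 MRZ checksum: character values computed arithmetically from the
--     char code (digits, A-Z, everything else 0), consumed in chunks of three with
--     the fixed weight pattern (7, 3, 1) instead of per-index weight selection."""
--     s = data_string.upper()
--     n = len(s)
--     total = 0
--     i = 0
--     while i < n:
--         a = _mrz_value(s[i])
--         b = _mrz_value(s[i + 1]) if i + 1 < n else 0
--         c = _mrz_value(s[i + 2]) if i + 2 < n else 0
--         total += 7 * a + 3 * b + c
--         i += 3
--     return str(total % 10)
-- ===== Notes on version B (the rewrite author's own statement) =====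
-- stated objective: alternative
-- what changed: Replaces A's dict lookup plus per-index weight selection (WEIGHTS[i % 3] inside one enumerated loop) with arithmetic character values computed from the char code and a chunked pass that consumes the string three characters at a time with the fixed weight pattern (7, 3, 1) and no index arithmetic or lookup table.
import Mathlib
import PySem

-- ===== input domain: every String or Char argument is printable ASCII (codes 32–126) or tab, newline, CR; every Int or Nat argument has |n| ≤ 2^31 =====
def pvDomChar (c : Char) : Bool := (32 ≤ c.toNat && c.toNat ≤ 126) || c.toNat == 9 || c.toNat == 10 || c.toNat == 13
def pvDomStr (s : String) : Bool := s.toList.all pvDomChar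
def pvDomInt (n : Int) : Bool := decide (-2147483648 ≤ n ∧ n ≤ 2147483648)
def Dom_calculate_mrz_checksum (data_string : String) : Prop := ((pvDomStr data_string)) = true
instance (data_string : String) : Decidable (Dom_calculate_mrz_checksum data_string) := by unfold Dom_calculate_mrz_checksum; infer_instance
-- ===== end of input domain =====

-- B replaces A's dict lookup + per-index weight WEIGHTS[i % 3] with arithmetic character
-- values from the char code, consumed in chunks of three with the fixed weights (7, 3, 1).
-- Objective: alternative decomposition, same cost.

-- ===== PORT A =====
def pvMRZ : PySem.Dict Char Int := PySem.Dict.ofList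
  [('0', 0), ('1', 1), ('2', 2), ('3', 3), ('4', 4), ('5', 5), ('6', 6), ('7', 7), ('8', 8), ('9', 9),
   ('<', 0), ('A', 10), ('B', 11), ('C', 12), ('D', 13), ('E', 14), ('F', 15), ('G', 16), ('H', 17),
   ('I', 18), ('J', 19), ('K', 20), ('L', 21), ('M', 22), ('N', 23), ('O', 24), ('P', 25), ('Q', 26),
   ('R', 27), ('S', 28), ('T', 29), ('U', 30), ('V', 31), ('W', 32), ('X', 33), ('Y', 34), ('Z', 35)]

def pvWEIGHTS : List Int := [7, 3, 1]

def calculate_mrz_checksum (data_string : String) : String :=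
  let total_sum := (PySem.List.enumerate (PySem.Str.upper data_string).toList 0).foldl
    (fun total_sum p =>
      let value := (pvMRZ.get? p.2).getD 0
      -- WEIGHTS[i % 3]: i % 3 ∈ {0,1,2} is always in range, so the IndexError branch (none) is unreachable; getD 0 is exact
      let weight := (PySem.List.pyGet? pvWEIGHTS (PySem.Int.mod p.1 3)).getD 0
      total_sum + value * weight) 0
  PySem.Int.toStr (PySem.Int.mod total_sum 10)

-- ===== PORT B =====
-- _mrz_value of Source B: the value from the character code, no lookup table
def pvVal (c : Char) : Int :=
  let o : Int := (c.toNat : Int)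
  if 48 ≤ o ∧ o ≤ 57 then o - 48
  else if 65 ≤ o ∧ o ≤ 90 then o - 55
  else 0

-- the chunked while loop of Source B: take up to three characters (missing ones count 0),
-- add 7*a + 3*b + c, continue on the rest
def pvChunks : List Char → Int
  | [] => 0
  | [a] => 7 * pvVal a + 3 * 0 + 0
  | [a, b] => 7 * pvVal a + 3 * pvVal b + 0
  | a :: b :: c :: rest => 7 * pvVal a + 3 * pvVal b + pvVal c + pvChunks rest

def calculate_mrz_checksum_alt (data_string : String) : String :=
  PySem.Int.toStr (PySem.Int.mod (pvChunks (PySem.Str.upper data_string).toList) 10)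

-- ===== PRECONDITION & SPEC =====
def Spec_calculate_mrz_checksum (data_string : String) (out : String) : Prop := out = calculate_mrz_checksum_alt data_string
instance (data_string : String) (out : String) : Decidable (Spec_calculate_mrz_checksum data_string out) := by unfold Spec_calculate_mrz_checksum; infer_instance

-- ===== CLAIM (what is proved, stated in full; the proofs are below) =====
def Claim_equal_calculate_mrz_checksum : Prop := ∀ (data_string : String), Dom_calculate_mrz_checksum data_string → Spec_calculate_mrz_checksum data_string (calculate_mrz_checksum data_string)

-- ===== LEMMAS AND PROOFS =====

-- A's table value (default 0) coincides with B's arithmetic value, for every character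
set_option maxRecDepth 4096 in
lemma pv_val_eq (c : Char) : (pvMRZ.get? c).getD 0 = pvVal c := by
  by_cases h : c.toNat < 128
  · have hc : c = Char.ofNat c.toNat := (Char.ofNat_toNat c).symm
    rw [hc]
    generalize c.toNat = n at h ⊢
    interval_cases n <;> decide
  · have hne : ∀ d : Char, d.toNat < 128 → (d == c) = false := by
      intro d hd
      refine beq_eq_false_iff_ne.mpr fun e => ?_
      subst e; omega
    have hall : ∀ q ∈ pvMRZ.items, q.1.toNat < 128 := by decide
    have hnone : List.find? (fun p => p.1 == c) pvMRZ.items = none := by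
      rw [List.find?_eq_none]
      intro p hp
      simp [hne p.1 (hall p hp)]
    simp only [PySem.Dict.get?, hnone, Option.map_none, Option.getD_none, pvVal]
    have h1 : ¬ (48 ≤ c.toNat ∧ c.toNat ≤ 57) := by omega
    have h2 : ¬ (65 ≤ c.toNat ∧ c.toNat ≤ 90) := by omega
    simp [h1, h2]

-- A's enumerated weighted fold, started at index 3*k, equals B's chunked total
lemma pv_fold_eq_chunks (n : Nat) : ∀ (chars : List Char), chars.length ≤ n → ∀ (k : Nat) (acc : Int),
    (PySem.List.enumerate chars (3 * (k : Int))).foldl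
      (fun total_sum p =>
        let value := (pvMRZ.get? p.2).getD 0
        let weight := (PySem.List.pyGet? pvWEIGHTS (PySem.Int.mod p.1 3)).getD 0
        total_sum + value * weight) acc
    = acc + pvChunks chars := by
  induction n with
  | zero =>
    intro chars h k acc
    have : chars = [] := List.length_eq_zero_iff.mp (Nat.le_zero.mp h)
    subst this
    simp [PySem.List.enumerate_nil, pvChunks]
  | succ n ih =>
    intro chars h k acc
    have hme : ∀ (m : Int), PySem.Int.mod m 3 = m % 3 := by
      intro m; simp [PySem.Int.mod, Int.fmod_eq_emod]
    have hm0 : PySem.Int.mod (3 * (k : Int)) 3 = 0 := by rw [hme]; omega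
    have hm1 : PySem.Int.mod (3 * (k : Int) + 1) 3 = 1 := by rw [hme]; omega
    have hm2 : PySem.Int.mod (3 * (k : Int) + 1 + 1) 3 = 2 := by rw [hme]; omega
    have w0 : (PySem.List.pyGet? pvWEIGHTS 0).getD 0 = 7 := by decide
    have w1 : (PySem.List.pyGet? pvWEIGHTS 1).getD 0 = 3 := by decide
    have w2 : (PySem.List.pyGet? pvWEIGHTS 2).getD 0 = 1 := by decide
    match chars with
    | [] => simp [PySem.List.enumerate_nil, pvChunks]
    | [a] =>
      simp [PySem.List.enumerate_cons, PySem.List.enumerate_nil, w0, pvChunks, pv_val_eq]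
      ring
    | [a, b] =>
      simp [PySem.List.enumerate_cons, PySem.List.enumerate_nil, w0, w1, pvChunks, pv_val_eq]
      ring
    | a :: b :: c :: rest =>
      have hlen : rest.length ≤ n := by simp at h; omega
      have hnext : 3 * (k : Int) + 1 + 1 + 1 = 3 * ((k + 1 : Nat) : Int) := by push_cast; ring
      simp only [PySem.List.enumerate_cons, List.foldl_cons, hm0, hm1, hm2, hnext]
      rw [ih rest hlen (k + 1)]
      simp [pvChunks, w0, w1, w2, pv_val_eq]
      ring

-- ===== VERDICT (by name: the statement is the Claim_ definition above) =====
theorem calculate_mrz_checksum_spec : Claim_equal_calculate_mrz_checksum := by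
  intro s _
  unfold Spec_calculate_mrz_checksum calculate_mrz_checksum calculate_mrz_checksum_alt
  have h := pv_fold_eq_chunks (PySem.Str.upper s).toList.length (PySem.Str.upper s).toList
    le_rfl 0 0
  simp only [Nat.cast_zero, mul_zero, zero_add] at h
  simp only [h]
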